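-- pv_equiv track=rewrite | github.com/felipeduuartee/rag-oracle-icc | query_rag.py | formatar_historico
-- ===== SOURCE A (Python) =====
-- def formatar_historico(history, max_chars=3000):
--     linhas = [f"Usuário: {q}\nOráculo: {a}" for q, a in history]
--     acumulado = []
--     total = 0
--
--     for linha in reversed(linhas):
--         if total + len(linha) > max_chars:
--             break
--         acumulado.insert(0, linha)
--         total += len(linha)
--
--     return "\n".join(acumulado)
-- ===== SOURCE B (Python) =====
-- def formatar_historico(history, max_chars=3000):
--     linhas = [f"Usuário: {q}\nOráculo: {a}" for q, a in history]
--     # cumulative lengths of the reversed lines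
--     cums = []
--     total = 0
--     for linha in reversed(linhas):
--         total += len(linha)
--         cums.append(total)
--     # k = number of trailing lines whose cumulative length fits the budget
--     k = 0
--     for c in cums:
--         if c > max_chars:
--             break
--         k += 1
--     return "\n".join(linhas[len(linhas) - k:])
-- ===== Notes on version B (the rewrite author's own statement) =====
-- stated objective: alternative
-- what changed: Replaces A's accumulate-and-break suffix-building loop (insert(0,..) into a growing list) by a prefix-sum table over the reversed line lengths plus a search for the count k of trailing lines that fit, returning a single slice join linhas[len(linhas)-k:].
import Mathlib
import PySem

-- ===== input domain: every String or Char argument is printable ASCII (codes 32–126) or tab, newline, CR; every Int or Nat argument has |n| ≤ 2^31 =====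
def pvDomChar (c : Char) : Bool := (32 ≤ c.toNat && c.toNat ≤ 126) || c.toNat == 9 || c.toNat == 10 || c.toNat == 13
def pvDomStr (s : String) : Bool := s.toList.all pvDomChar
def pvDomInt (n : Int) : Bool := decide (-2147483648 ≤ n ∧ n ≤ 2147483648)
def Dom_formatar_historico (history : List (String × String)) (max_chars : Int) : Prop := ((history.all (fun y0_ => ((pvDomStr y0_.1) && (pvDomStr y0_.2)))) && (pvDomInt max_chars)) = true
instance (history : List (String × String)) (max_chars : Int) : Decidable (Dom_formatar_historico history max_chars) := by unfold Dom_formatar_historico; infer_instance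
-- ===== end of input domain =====

-- B replaces A's accumulate-and-break loop by a prefix-sum table over reversed line
-- lengths plus a count-then-slice; same return value (alternative decomposition).

-- ===== PORT A =====
-- f"Usuário: {q}\nOráculo: {a}" as a list of code points
def fhLine (q a : String) : List Char :=
  "Usuário: ".toList ++ q.toList ++ "\nOráculo: ".toList ++ a.toList

-- A's for-loop over reversed(linhas): state (acumulado, total), break on overflow
def fhLoopA (mx : Int) : List (List Char) → List (List Char) → Int → List (List Char)
  | [], acc, _ => acc
  | l :: rest, acc, total =>
    if total + (l.length : Int) > mx then acc
    else fhLoopA mx rest (l :: acc) (total + (l.length : Int))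

def formatar_historico (history : List (String × String)) (max_chars : Int) : String :=
  let linhas := history.map (fun p => fhLine p.1 p.2)
  let acumulado := fhLoopA max_chars linhas.reverse [] 0
  String.ofList (List.intercalate ['\n'] acumulado)

-- ===== PORT B =====
-- the cums-building loop of Source B: running totals of the lengths
def fhCums : List (List Char) → Int → List Int
  | [], _ => []
  | l :: rest, total => (total + (l.length : Int)) :: fhCums rest (total + (l.length : Int))

-- the k-counting loop of Source B (break on the first cumulative sum over budget)
def fhCount (mx : Int) : List Int → Nat
  | [] => 0
  | c :: rest => if c > mx then 0 else 1 + fhCount mx rest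

def formatar_historico_alt (history : List (String × String)) (max_chars : Int) : String :=
  let linhas := history.map (fun p => fhLine p.1 p.2)
  let cums := fhCums linhas.reverse 0
  let k := fhCount max_chars cums
  String.ofList (List.intercalate ['\n']
    (PySem.List.slice linhas (some ((linhas.length : Int) - (k : Int))) none))

-- ===== PRECONDITION & SPEC =====
def Spec_formatar_historico (history : List (String × String)) (max_chars : Int) (out : String) : Prop := out = formatar_historico_alt history max_chars
instance (history : List (String × String)) (max_chars : Int) (out : String) : Decidable (Spec_formatar_historico history max_chars out) := by unfold Spec_formatar_historico; infer_instance

-- ===== CLAIM (what is proved, stated in full; the proofs are below) =====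
def Claim_equal_formatar_historico : Prop := ∀ (history : List (String × String)) (max_chars : Int), Dom_formatar_historico history max_chars → Spec_formatar_historico history max_chars (formatar_historico history max_chars)

-- ===== LEMMAS AND PROOFS =====
-- the budget-limited prefix of the reversed list that A accumulates
def fhTake (mx : Int) : List (List Char) → Int → List (List Char)
  | [], _ => []
  | l :: rest, t => if t + (l.length : Int) > mx then [] else l :: fhTake mx rest (t + (l.length : Int))

theorem fhLoopA_eq_take (mx : Int) (r : List (List Char)) :
    ∀ (acc : List (List Char)) (t : Int),
      fhLoopA mx r acc t = (fhTake mx r t).reverse ++ acc := by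
  induction r with
  | nil => intro acc t; simp [fhLoopA, fhTake]
  | cons l rest ih =>
    intro acc t
    by_cases h : t + (l.length : Int) > mx
    · simp [fhLoopA, fhTake, h]
    · simp [fhLoopA, fhTake, h, ih]

theorem fhTake_eq_take_count (mx : Int) (r : List (List Char)) :
    ∀ (t : Int), fhTake mx r t = r.take (fhCount mx (fhCums r t)) := by
  induction r with
  | nil => intro t; simp [fhTake, fhCums, fhCount]
  | cons l rest ih =>
    intro t
    by_cases h : t + (l.length : Int) > mx
    · simp [fhTake, fhCums, fhCount, h]
    · simp [fhTake, fhCums, fhCount, h, ih, Nat.one_add]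

theorem fhCount_le_length (mx : Int) (r : List (List Char)) :
    ∀ (t : Int), fhCount mx (fhCums r t) ≤ r.length := by
  induction r with
  | nil => intro t; simp [fhCums, fhCount]
  | cons l rest ih =>
    intro t
    by_cases h : (t + (l.length : Int)) > mx
    · simp [fhCums, fhCount, h]
    · simpa [fhCums, fhCount, h, Nat.add_comm] using
        Nat.succ_le_succ (ih (t + (l.length : Int)))

theorem formatar_historico_eq (history : List (String × String)) (max_chars : Int) :
    formatar_historico history max_chars = formatar_historico_alt history max_chars := by
  simp only [formatar_historico, formatar_historico_alt]
  generalize (history.map fun p => fhLine p.1 p.2) = linhas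
  have hkle : fhCount max_chars (fhCums linhas.reverse 0) ≤ linhas.length := by
    simpa using fhCount_le_length max_chars linhas.reverse 0
  rw [fhLoopA_eq_take, fhTake_eq_take_count,
      PySem.List.slice_from _ (by omega : (0 : Int) ≤
        (linhas.length : Int) - (fhCount max_chars (fhCums linhas.reverse 0) : Int))]
  simp only [List.append_nil, List.take_reverse, List.reverse_reverse]
  congr 3
  omega

-- ===== VERDICT (by name: the statement is the Claim_ definition above) =====
theorem formatar_historico_spec : Claim_equal_formatar_historico := by
  intro history max_chars _
  exact formatar_historico_eq history max_chars
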